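-- pv_equiv track=rewrite | github.com/ShuvoSahaRoy/Journey-with-Coursera | Crush-Course-on-Python-Google/dictionary.py | groups_per_user
-- ===== SOURCE A (Python) =====
-- def groups_per_user(group_dictionary):
--     user_groups = {}
--     group=[]
--
--     for group in group_dictionary.keys():
--         # Now go through the users in the group
--         for users in group_dictionary[group]:
--             lst = []
--             for group in group_dictionary.keys():
--                 if users in group_dictionary[group] and users not in lst:
--                     lst.append(group)
--             user_groups[users] = lst
--     return user_groups
-- ===== SOURCE B (Python) =====
-- def groups_per_user(group_dictionary):
--     # Single pass over the memberships: append each group to each of its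
--     # members' lists (skipping a duplicate member inside the same group).
--     user_groups = {}
--     for group, members in group_dictionary.items():
--         for user in members:
--             groups = user_groups.setdefault(user, [])
--             if group not in groups:
--                 groups.append(group)
--     return user_groups
-- ===== Notes on version B (the rewrite author's own statement) =====
-- stated objective: faster
-- what changed: Replaced A's per-member rescan of the whole dictionary (three nested loops) by a single pass that appends each group to its members' lists, O(total memberships) instead of O(G^2*U).
-- intended difference: When some group has the same name as one of its own members and a later group also contains that member, A's 'users not in lst' test compares the user name against already-collected group names and silently drops all later groups from that user's list; B returns the full list of groups containing the user, which is the intended result. — e.g. on groups_per_user([("a", ["a"]), ("b", ["a"])]): A returns [("a", ["a"])], B returns [("a", ["a", "b"])]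
import Mathlib
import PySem

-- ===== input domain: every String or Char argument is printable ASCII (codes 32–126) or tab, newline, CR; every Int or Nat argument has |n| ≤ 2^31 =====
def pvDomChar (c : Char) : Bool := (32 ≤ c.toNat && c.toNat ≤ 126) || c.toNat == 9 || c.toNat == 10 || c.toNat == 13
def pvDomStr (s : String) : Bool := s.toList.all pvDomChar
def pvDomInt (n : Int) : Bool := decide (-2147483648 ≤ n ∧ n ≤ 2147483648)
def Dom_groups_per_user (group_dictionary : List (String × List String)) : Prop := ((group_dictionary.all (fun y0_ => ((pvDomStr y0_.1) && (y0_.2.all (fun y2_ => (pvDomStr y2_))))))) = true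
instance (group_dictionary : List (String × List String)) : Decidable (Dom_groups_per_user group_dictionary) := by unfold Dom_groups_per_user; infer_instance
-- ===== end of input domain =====

-- B replaces A's per-member rescan of the whole dictionary (three nested loops) by a single
-- pass appending each group to its members' lists; on inputs where a group shares its name
-- with one of its own members A silently truncates that member's list (see D_ below) and B
-- returns the full list of groups containing the member.


-- ===== PORT A =====
-- literal transliteration of A: for every group key, for every user in that group,
-- rebuild from scratch the list of all groups whose member list contains the user
-- (skipping a group when the USER name is already in the list — A's quirk), and
-- (re)insert it under the user.
def groups_per_user (group_dictionary : List (String × List String)) : List (String × List String) :=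
  let d : PySem.Dict String (List String) := PySem.Dict.mk group_dictionary
  let user_groups : PySem.Dict String (List String) :=
    d.keys.foldl (fun user_groups group =>
      (d.getD group []).foldl (fun user_groups users =>
        let lst : List String :=
          d.keys.foldl (fun lst group =>
            if users ∈ d.getD group [] ∧ users ∉ lst then lst ++ [group] else lst) []
        user_groups.insert users lst) user_groups) PySem.Dict.empty
  user_groups.items
-- (group_dictionary[group] with group drawn from .keys() always succeeds; getD is exact there)

-- ===== PORT B =====
-- literal transliteration of Source B: one pass; for each (group, members) append group to each
-- member's list via setdefault unless already present.
def groups_per_user_alt (group_dictionary : List (String × List String)) : List (String × List String) :=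
  (group_dictionary.foldl (fun (user_groups : PySem.Dict String (List String)) p =>
      p.2.foldl (fun user_groups user =>
        let groups := user_groups.getD user []
        if p.1 ∈ groups then user_groups else user_groups.insert user (groups ++ [p.1]))
        user_groups) PySem.Dict.empty).items

-- ===== PRECONDITION & SPEC =====
-- Pre_ excludes association lists with duplicate keys: a Python dict cannot have them, so
-- no dict argument of A corresponds to such a list.
def Pre_groups_per_user (group_dictionary : List (String × List String)) : Prop :=
  (group_dictionary.map Prod.fst).Nodup
instance (group_dictionary : List (String × List String)) : Decidable (Pre_groups_per_user group_dictionary) := by unfold Pre_groups_per_user; infer_instance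
def pvWitness_groups_per_user : (List (String × List String)) :=
  [("g1", ["u", "v"]), ("g2", ["v", "w"])]

-- When some group has the same name as one of its own members and a later group also contains
-- that member, A's 'users not in lst' test compares the user name against already-collected
-- group names and silently drops all later groups from that user's list; B returns the full
-- list of groups containing the user, which is the intended result.
def D_groups_per_user (group_dictionary : List (String × List String)) : Prop :=
  ¬ group_dictionary.Pairwise (fun p q => p.1 ∈ p.2 → p.1 ∉ q.2)
instance (group_dictionary : List (String × List String)) : Decidable (D_groups_per_user group_dictionary) := by unfold D_groups_per_user; infer_instance

def Spec_groups_per_user (group_dictionary : List (String × List String)) (out : List (String × List String)) : Prop := ¬ D_groups_per_user group_dictionary → out = groups_per_user_alt group_dictionary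
instance (group_dictionary : List (String × List String)) (out : List (String × List String)) : Decidable (Spec_groups_per_user group_dictionary out) := by unfold Spec_groups_per_user; infer_instance

def pvDiffWitness_groups_per_user : (List (String × List String)) :=
  [("a", ["a"]), ("b", ["a"])]
def pvDiffWitnessOut_groups_per_user : (List (String × List String)) × (List (String × List String)) :=
  ([("a", ["a"])], [("a", ["a", "b"])])

-- ===== CLAIM (what is proved, stated in full; the proofs are below) =====
def Claim_unchanged_groups_per_user : Prop := ∀ (group_dictionary : List (String × List String)), Dom_groups_per_user group_dictionary → Pre_groups_per_user group_dictionary → Spec_groups_per_user group_dictionary (groups_per_user group_dictionary)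
def Claim_changed_groups_per_user : Prop := Dom_groups_per_user (pvDiffWitness_groups_per_user) ∧ Pre_groups_per_user (pvDiffWitness_groups_per_user) ∧ D_groups_per_user (pvDiffWitness_groups_per_user) ∧ groups_per_user (pvDiffWitness_groups_per_user) = pvDiffWitnessOut_groups_per_user.1 ∧ groups_per_user_alt (pvDiffWitness_groups_per_user) = pvDiffWitnessOut_groups_per_user.2 ∧ pvDiffWitnessOut_groups_per_user.1 ≠ pvDiffWitnessOut_groups_per_user.2

-- ===== LEMMAS AND PROOFS =====

def Fg (l : List (String × List String)) (u : String) : List String :=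
  (l.filter (fun p => u ∈ p.2)).map Prod.fst

-- A's inner rescan, under the no-quirk hypothesis, collects exactly the groups containing u
lemma innerA (u : String) (l : List (String × List String)) (acc : List String)
    (hpw : l.Pairwise (fun p q => p.1 ∈ p.2 → p.1 ∉ q.2))
    (hacc : ∀ p ∈ l, u ∈ p.2 → u ∉ acc) :
    l.foldl (fun lst p => if u ∈ p.2 ∧ u ∉ lst then lst ++ [p.1] else lst) acc
      = acc ++ Fg l u := by
  induction l generalizing acc with
  | nil => simp [Fg]
  | cons p l ih =>
    rcases List.pairwise_cons.mp hpw with ⟨hhead, htail⟩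
    by_cases hu : u ∈ p.2
    · have hna : u ∉ acc := hacc p (by simp) hu
      have hc : u ∈ p.2 ∧ u ∉ acc := ⟨hu, hna⟩
      simp only [List.foldl_cons, if_pos hc]
      rw [ih _ htail ?_]
      · simp [Fg, hu]
      · intro q hq huq
        simp only [List.mem_append, List.mem_singleton]
        rintro (h | h)
        · exact hacc q (List.mem_cons_of_mem _ hq) huq h
        · subst h
          exact hhead q hq hu huq
    · have hc : ¬(u ∈ p.2 ∧ u ∉ acc) := fun h => hu h.1
      simp only [List.foldl_cons, if_neg hc]
      rw [ih _ htail (fun q hq huq => hacc q (List.mem_cons_of_mem _ hq) huq)]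
      simp [Fg, hu]

-- folding inserts of (u, v u) builds exactly the first-occurrence map
lemma insertAll (v : String → List String) (xs : List String) :
    ∀ (ks : List String) (d : PySem.Dict String (List String)),
    ks.Nodup → d.items = ks.map (fun u => (u, v u)) →
    (xs.foldl (fun d u => d.insert u (v u)) d).items
      = (PySem.Set.update ks xs).map (fun u => (u, v u)) := by
  induction xs with
  | nil => intro ks d _ hd; simpa only [List.foldl_nil, PySem.Set.update_nil] using hd
  | cons u xs ih =>
    intro ks d hnd hd
    have hkeys : d.keys = ks := by
      show d.items.map Prod.fst = ks
      rw [hd]; simp [Function.comp_def]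
    rw [List.foldl_cons, PySem.Set.update_cons]
    by_cases hu : u ∈ ks
    · have hc : d.contains u = true := (PySem.Dict.contains_iff_mem_keys d u).mpr (hkeys ▸ hu)
      have hitems : (d.insert u (v u)).items = ks.map (fun w => (w, v w)) := by
        rw [PySem.Dict.items_insert_of_contains d (v u) hc, hd, List.map_map]
        apply List.map_congr_left
        intro w _
        by_cases hw : w = u
        · subst hw; simp
        · simp [Function.comp, hw]
      rw [PySem.Set.add_of_mem hu]
      exact ih ks _ hnd hitems
    · have hc : d.contains u = false := by
        cases h : d.contains u
        · rfl
        · exfalso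
          have hm := (PySem.Dict.contains_iff_mem_keys d u).mp h
          rw [hkeys] at hm
          exact hu hm
      have hitems : (d.insert u (v u)).items = (ks ++ [u]).map (fun w => (w, v w)) := by
        rw [PySem.Dict.items_insert_of_not_contains d (v u) hc, hd]; simp
      rw [PySem.Set.add_of_not_mem hu]
      exact ih (ks ++ [u]) _
        (by simp [List.nodup_append, hnd]
            intro a ha h
            exact hu (h ▸ ha)) hitems

lemma Fg_subset_keys (pre : List (String × List String)) (u g : String)
    (h : g ∈ Fg pre u) : g ∈ pre.map Prod.fst := by
  simp only [Fg, List.mem_map, List.mem_filter] at h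
  rcases h with ⟨p, ⟨hp, _⟩, rfl⟩
  exact List.mem_map_of_mem hp

lemma Fg_nil_of_not_mem_flat (pre : List (String × List String)) (u : String)
    (h : u ∉ pre.flatMap Prod.snd) : Fg pre u = [] := by
  simp only [Fg, List.map_eq_nil_iff, List.filter_eq_nil_iff]
  intro p hp hu
  exact h (List.mem_flatMap_of_mem hp (by simpa using hu))

lemma Fg_append_singleton (pre : List (String × List String)) (p : String × List String) (u : String) :
    Fg (pre ++ [p]) u = Fg pre u ++ (if u ∈ p.2 then [p.1] else []) := by
  by_cases h : u ∈ p.2 <;> simp [Fg, h]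

-- B's inner loop over the members of one group g
lemma B_inner (g : String) (pre : List (String × List String)) (hg : g ∉ pre.map Prod.fst)
    (ms2 : List String) :
    ∀ (taken : List String) (d : PySem.Dict String (List String)),
    d.items = (PySem.Set.ofList (pre.flatMap Prod.snd ++ taken)).map
        (fun u => (u, Fg pre u ++ if u ∈ taken then [g] else [])) →
    (ms2.foldl (fun d u =>
        let gs := d.getD u []
        if g ∈ gs then d else d.insert u (gs ++ [g])) d).items
      = (PySem.Set.ofList (pre.flatMap Prod.snd ++ (taken ++ ms2))).map
        (fun u => (u, Fg pre u ++ if u ∈ taken ++ ms2 then [g] else [])) := by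
  induction ms2 with
  | nil => intro taken d hd; simpa only [List.foldl_nil, List.append_nil] using hd
  | cons u ms2 ih =>
    intro taken d hd
    have hassoc : taken ++ u :: ms2 = (taken ++ [u]) ++ ms2 := by simp
    have hSnd : (PySem.Set.ofList (pre.flatMap Prod.snd ++ taken)).Nodup :=
      PySem.Set.nodup_ofList _
    have hkeys : d.keys = PySem.Set.ofList (pre.flatMap Prod.snd ++ taken) := by
      show d.items.map Prod.fst = _
      rw [hd]; simp [Function.comp_def]
    have hkeysnd : d.keys.Nodup := by rw [hkeys]; exact hSnd
    rw [List.foldl_cons, hassoc]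
    by_cases hu : u ∈ pre.flatMap Prod.snd ++ taken
    · have huS : u ∈ PySem.Set.ofList (pre.flatMap Prod.snd ++ taken) :=
        (PySem.Set.mem_ofList _ _).mpr hu
      have hget : d.getD u [] = Fg pre u ++ if u ∈ taken then [g] else [] :=
        PySem.Dict.getD_of_mem_items d (hd ▸ List.mem_map_of_mem huS) hkeysnd []
      have hofeq : PySem.Set.ofList (pre.flatMap Prod.snd ++ (taken ++ [u]))
          = PySem.Set.ofList (pre.flatMap Prod.snd ++ taken) := by
        rw [show pre.flatMap Prod.snd ++ (taken ++ [u]) = (pre.flatMap Prod.snd ++ taken) ++ [u] by simp,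
          PySem.Set.ofList_append_singleton, PySem.Set.add_of_mem huS]
      by_cases ht : u ∈ taken
      · have : g ∈ d.getD u [] := by rw [hget]; simp [ht]
        simp only [this, if_pos]
        apply ih (taken ++ [u]) d
        rw [hofeq, hd]
        apply List.map_congr_left
        intro w _
        have : w ∈ taken ++ [u] ↔ w ∈ taken := by
          simp only [List.mem_append, List.mem_singleton]
          constructor
          · rintro (h | rfl); exact h; exact ht
          · exact Or.inl
        simp only [this]
      · have hgg : g ∉ d.getD u [] := by
          rw [hget]
          simp only [ht, List.append_nil, ite_false]
          intro hmem
          exact hg (Fg_subset_keys pre u g hmem)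
        have hX : u ∈ pre.flatMap Prod.snd := by
          rcases List.mem_append.mp hu with h | h; exact h; exact absurd h ht
        have hc : d.contains u = true := (PySem.Dict.contains_iff_mem_keys d u).mpr (hkeys ▸ huS)
        simp only [hgg, ite_false]
        apply ih (taken ++ [u])
        rw [PySem.Dict.items_insert_of_contains d _ hc, hd, List.map_map, hofeq]
        apply List.map_congr_left
        intro w _
        by_cases hw : w = u
        · subst hw
          simp [hget, ht]
        · have : w ∈ taken ++ [u] ↔ w ∈ taken := by
            simp only [List.mem_append, List.mem_singleton]
            constructor
            · rintro (h | rfl); exact h; exact absurd rfl hw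
            · exact Or.inl
          simp [Function.comp, hw, this]
    · have huS : u ∉ PySem.Set.ofList (pre.flatMap Prod.snd ++ taken) := by
        rw [PySem.Set.mem_ofList]; exact hu
      have hc : d.contains u = false := by
        cases h : d.contains u
        · rfl
        · exfalso
          have hm := (PySem.Dict.contains_iff_mem_keys d u).mp h
          rw [hkeys] at hm
          exact huS hm
      have hget : d.getD u [] = [] := PySem.Dict.getD_of_not_contains d [] hc
      have hX : u ∉ pre.flatMap Prod.snd := fun h => hu (List.mem_append_left _ h)
      have ht : u ∉ taken := fun h => hu (List.mem_append_right _ h)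
      simp only [hget, List.not_mem_nil, ite_false, List.nil_append]
      apply ih (taken ++ [u])
      rw [PySem.Dict.items_insert_of_not_contains d _ hc, hd]
      rw [show pre.flatMap Prod.snd ++ (taken ++ [u]) = (pre.flatMap Prod.snd ++ taken) ++ [u] by simp,
        PySem.Set.ofList_append_singleton, PySem.Set.add_of_not_mem huS, List.map_append]
      congr 1
      · apply List.map_congr_left
        intro w hw
        have hwu : w ≠ u := fun h => huS (h ▸ hw)
        have : w ∈ taken ++ [u] ↔ w ∈ taken := by
          simp only [List.mem_append, List.mem_singleton]
          constructor
          · rintro (h | rfl); exact h; exact absurd rfl hwu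
          · exact Or.inl
        simp only [this]
      · simp [Fg_nil_of_not_mem_flat pre u hX]

lemma B_outer (rest : List (String × List String)) :
    ∀ (pre : List (String × List String)) (d : PySem.Dict String (List String)),
    ((pre ++ rest).map Prod.fst).Nodup →
    d.items = (PySem.Set.ofList (pre.flatMap Prod.snd)).map (fun u => (u, Fg pre u)) →
    (rest.foldl (fun d p => p.2.foldl (fun d u =>
        let gs := d.getD u []
        if p.1 ∈ gs then d else d.insert u (gs ++ [p.1])) d) d).items
      = (PySem.Set.ofList ((pre ++ rest).flatMap Prod.snd)).map (fun u => (u, Fg (pre ++ rest) u)) := by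
  induction rest with
  | nil => intro pre d _ hd; simpa using hd
  | cons p rest ih =>
    intro pre d hnd hd
    have hg : p.1 ∉ pre.map Prod.fst := by
      rw [List.map_append, List.nodup_append] at hnd
      intro h
      have := hnd.2.2 p.1 h
      simp at this
    rw [List.foldl_cons]
    have h1 := B_inner p.1 pre hg p.2 [] d (by simpa using hd)
    have hassoc : pre ++ p :: rest = (pre ++ [p]) ++ rest := by simp
    rw [hassoc]
    apply ih (pre ++ [p])
    · rw [← hassoc]; exact hnd
    · rw [h1]
      simp only [List.nil_append, List.flatMap_append, List.flatMap_cons, List.flatMap_nil,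
        List.append_nil]
      apply List.map_congr_left
      intro w _
      rw [Fg_append_singleton]
      rfl

lemma getD_mk (l : List (String × List String)) (hpre : (l.map Prod.fst).Nodup) :
    ∀ p ∈ l, (PySem.Dict.mk l).getD p.1 [] = p.2 := by
  intro p hp
  exact PySem.Dict.getD_of_mem_items _ hp (by simpa [PySem.Dict.keys] using hpre) []

lemma lstA (l : List (String × List String)) (hpre : (l.map Prod.fst).Nodup)
    (hpw : l.Pairwise (fun p q => p.1 ∈ p.2 → p.1 ∉ q.2)) (u : String) :
    (PySem.Dict.mk l).keys.foldl (fun lst group =>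
        if u ∈ (PySem.Dict.mk l).getD group [] ∧ u ∉ lst then lst ++ [group] else lst) []
      = Fg l u := by
  have h1 : (PySem.Dict.mk l).keys = l.map Prod.fst := by simp [PySem.Dict.keys]
  rw [h1, List.foldl_map]
  rw [PySem.List.foldl_congr_mem l _ (fun lst p => if u ∈ p.2 ∧ u ∉ lst then lst ++ [p.1] else lst) []
    (fun acc p hp => by rw [getD_mk l hpre p hp])]
  simpa using innerA u l [] hpw (by simp)

lemma pv_main (l : List (String × List String)) (hpre : (l.map Prod.fst).Nodup)
    (hpw : l.Pairwise (fun p q => p.1 ∈ p.2 → p.1 ∉ q.2)) :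
    groups_per_user l = groups_per_user_alt l := by
  have h1 : (PySem.Dict.mk l).keys = l.map Prod.fst := by simp [PySem.Dict.keys]
  show (((PySem.Dict.mk l).keys.foldl _ PySem.Dict.empty) : PySem.Dict String (List String)).items = _
  simp only [lstA l hpre hpw]
  rw [h1, List.foldl_map]
  rw [PySem.List.foldl_congr_mem l _
    (fun ug p => p.2.foldl (fun ug u => ug.insert u (Fg l u)) ug) PySem.Dict.empty
    (fun acc p hp => by rw [getD_mk l hpre p hp])]
  rw [← List.foldl_flatMap]
  rw [insertAll (fun u => Fg l u) (l.flatMap Prod.snd) [] PySem.Dict.empty (by simp) (by rfl)]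
  have hb := B_outer l [] PySem.Dict.empty (by simpa using hpre) (by rfl)
  simp only [List.nil_append] at hb
  rw [PySem.Set.update_nil_left]
  exact hb.symm


-- ===== VERDICT (by name: the statement is the Claim_ definition above) =====
theorem groups_per_user_spec : Claim_unchanged_groups_per_user := by
  intro l _ hpre hD
  have hpw : l.Pairwise (fun p q => p.1 ∈ p.2 → p.1 ∉ q.2) := by
    by_contra h
    exact hD h
  exact pv_main l hpre hpw

theorem groups_per_user_changed : Claim_changed_groups_per_user := by
  unfold Claim_changed_groups_per_user; decide
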